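-- pv_equiv track=rewrite | github.com/NguyenQuan297/JamSight | backend/train/chord_classifier.py | label_to_idx
-- ===== SOURCE A (Python) =====
-- ROOTS = ["C", "C#", "D", "Eb", "E", "F", "F#", "G", "Ab", "A", "Bb", "B"]
--
-- CHORD_TYPES = ["maj", "min", "7", "maj7", "min7", "dim", "aug", "sus4"]
--
-- def label_to_idx(label: str) -> int:
--     """Convert chord label to class index."""
--     label = label.strip()
--     root_idx = -1
--     root_len = 0
--     for i, r in enumerate(ROOTS):
--         if label.startswith(r) and len(r) > root_len:
--             root_idx = i
--             root_len = len(r)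
--     if root_idx == -1:
--         return 0
--
--     suffix = label[root_len:]
--     suffix_map = {"": "maj", "m": "min", "M7": "maj7", "min7": "min7",
--                   "m7": "min7", "dom7": "7"}
--     suffix = suffix_map.get(suffix, suffix)
--     if suffix not in CHORD_TYPES:
--         suffix = "maj"
--
--     return root_idx * len(CHORD_TYPES) + CHORD_TYPES.index(suffix)
-- ===== SOURCE B (Python) =====
-- ROOTS = ["C", "C#", "D", "Eb", "E", "F", "F#", "G", "Ab", "A", "Bb", "B"]
--
-- CHORD_TYPES = ["maj", "min", "7", "maj7", "min7", "dim", "aug", "sus4"]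
--
-- # Roots split by length: two-char roots tried first (longest prefix wins), then one-char.
-- _ROOT2 = {r: i for i, r in enumerate(ROOTS) if len(r) == 2}
-- _ROOT1 = {r: i for i, r in enumerate(ROOTS) if len(r) == 1}
--
-- _SUFFIX_MAP = {"": "maj", "m": "min", "M7": "maj7", "min7": "min7",
--                "m7": "min7", "dom7": "7"}
--
--
-- def label_to_idx(label: str) -> int:
--     """Convert chord label to class index."""
--     label = label.strip()
--     root_idx = _ROOT2.get(label[:2])
--     root_len = 2
--     if root_idx is None:
--         root_idx = _ROOT1.get(label[:1])
--         root_len = 1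
--         if root_idx is None:
--             return 0
--     suffix = _SUFFIX_MAP.get(label[root_len:], label[root_len:])
--     if suffix not in CHORD_TYPES:
--         suffix = "maj"
--     return root_idx * len(CHORD_TYPES) + CHORD_TYPES.index(suffix)
-- ===== Notes on version B (the rewrite author's own statement) =====
-- stated objective: idiomatic
-- what changed: Replaces the longest-prefix linear scan over ROOTS (with a running best-length accumulator) by two direct dictionary lookups: a root->index dict for two-char roots tried first, then one for one-char roots.
import Mathlib
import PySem

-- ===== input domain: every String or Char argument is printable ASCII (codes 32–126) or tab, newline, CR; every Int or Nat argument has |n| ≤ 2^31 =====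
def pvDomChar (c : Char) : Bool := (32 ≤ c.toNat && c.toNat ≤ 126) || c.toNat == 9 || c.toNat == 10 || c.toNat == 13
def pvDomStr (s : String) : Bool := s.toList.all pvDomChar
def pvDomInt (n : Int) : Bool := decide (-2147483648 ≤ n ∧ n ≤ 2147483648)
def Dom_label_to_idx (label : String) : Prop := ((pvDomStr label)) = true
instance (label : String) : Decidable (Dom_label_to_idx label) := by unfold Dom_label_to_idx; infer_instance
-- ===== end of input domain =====

-- B replaces A's longest-prefix linear scan over ROOTS by two direct dict lookups
-- (two-char roots first, then one-char); objective: idiomatic, same cost.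


-- ===== PORT A =====
-- Strings are handled as List Char via PySem.Chars (exact on the ASCII domain).
def pvROOTS : List (List Char) :=
  [['C'], ['C','#'], ['D'], ['E','b'], ['E'], ['F'], ['F','#'], ['G'], ['A','b'], ['A'], ['B','b'], ['B']]

def pvCHORD_TYPES : List (List Char) :=
  [['m','a','j'], ['m','i','n'], ['7'], ['m','a','j','7'], ['m','i','n','7'], ['d','i','m'], ['a','u','g'], ['s','u','s','4']]

def pvSUFFIX_MAP : PySem.Dict (List Char) (List Char) :=
  PySem.Dict.ofList [([], ['m','a','j']), (['m'], ['m','i','n']), (['M','7'], ['m','a','j','7']),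
    (['m','i','n','7'], ['m','i','n','7']), (['m','7'], ['m','i','n','7']), (['d','o','m','7'], ['7'])]

-- A's for-loop over enumerate(ROOTS), named so the proofs can speak about it
def pvLoopA (s : List Char) : Int × Int :=
  (PySem.List.enumerate pvROOTS).foldl
    (fun (st : Int × Int) ir =>
      if PySem.Chars.startswith s ir.2 && decide (st.2 < PySem.Chars.len ir.2) then
        (ir.1, PySem.Chars.len ir.2)
      else st)
    (-1, 0)

def label_to_idx (label : String) : Int :=
  let s := PySem.Chars.strip label.toList
  let st := pvLoopA s
  if st.1 = -1 then 0
  else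
    let suffix := PySem.Chars.slice s (some st.2) none
    let suffix := PySem.Dict.getD pvSUFFIX_MAP suffix suffix
    let suffix := if pvCHORD_TYPES.contains suffix then suffix else ['m','a','j']
    -- CHORD_TYPES.index(suffix): suffix is a member here, so Python never raises; `.getD 0` is an unreachable default
    st.1 * PySem.List.len pvCHORD_TYPES + (((PySem.List.index? pvCHORD_TYPES suffix).getD 0 : Nat) : Int)

-- ===== PORT B =====
-- _ROOT2 / _ROOT1: dicts root → index, built from enumerate(ROOTS) filtered by root length
def pvROOT2 : PySem.Dict (List Char) Int :=
  PySem.Dict.ofList (((PySem.List.enumerate pvROOTS).filter (fun ir => ir.2.length == 2)).map (fun ir => (ir.2, ir.1)))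

def pvROOT1 : PySem.Dict (List Char) Int :=
  PySem.Dict.ofList (((PySem.List.enumerate pvROOTS).filter (fun ir => ir.2.length == 1)).map (fun ir => (ir.2, ir.1)))

-- tail of the Source B function: suffix normalisation and final index
def pvBsuffix (root_idx : Int) (rest : List Char) : Int :=
  let suffix := PySem.Dict.getD pvSUFFIX_MAP rest rest
  let suffix := if pvCHORD_TYPES.contains suffix then suffix else ['m','a','j']
  root_idx * PySem.List.len pvCHORD_TYPES + (((PySem.List.index? pvCHORD_TYPES suffix).getD 0 : Nat) : Int)

def label_to_idx_alt (label : String) : Int :=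
  let s := PySem.Chars.strip label.toList
  match PySem.Dict.get? pvROOT2 (PySem.Chars.slice s none (some 2)) with
  | some i => pvBsuffix i (PySem.Chars.slice s (some 2) none)
  | none =>
    match PySem.Dict.get? pvROOT1 (PySem.Chars.slice s none (some 1)) with
    | some i => pvBsuffix i (PySem.Chars.slice s (some 1) none)
    | none => 0

-- ===== PRECONDITION & SPEC =====
def Spec_label_to_idx (label : String) (out : Int) : Prop := out = label_to_idx_alt label
instance (label : String) (out : Int) : Decidable (Spec_label_to_idx label out) := by unfold Spec_label_to_idx; infer_instance

-- ===== CLAIM (what is proved, stated in full; the proofs are below) =====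
def Claim_equal_label_to_idx : Prop := ∀ (label : String), Dom_label_to_idx label → Spec_label_to_idx label (label_to_idx label)

-- ===== LEMMAS AND PROOFS =====
theorem root2_eq : pvROOT2 = PySem.Dict.mk [(['C','#'],1),(['E','b'],3),(['F','#'],6),(['A','b'],8),(['B','b'],10)] := by decide
theorem root1_eq : pvROOT1 = PySem.Dict.mk [(['C'],0),(['D'],2),(['E'],4),(['F'],5),(['G'],7),(['A'],9),(['B'],11)] := by decide

-- A's loop result, phrased as B's two lookups
theorem pvLoopA_eq (cs : List Char) : pvLoopA cs =
    (match PySem.Dict.get? pvROOT2 (PySem.Chars.slice cs none (some 2)) with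
     | some i => (i, 2)
     | none =>
       match PySem.Dict.get? pvROOT1 (PySem.Chars.slice cs none (some 1)) with
       | some i => (i, 1)
       | none => (-1, 0)) := by
  match cs with
  | [] => decide
  | [c] =>
    rw [PySem.Chars.slice, PySem.List.slice_to _ (by norm_num : (0:Int) ≤ 2),
        PySem.Chars.slice, PySem.List.slice_to _ (by norm_num : (0:Int) ≤ 1)]
    by_cases hC : c = 'C'; · subst hC; rfl
    by_cases hD : c = 'D'; · subst hD; rfl
    by_cases hE : c = 'E'; · subst hE; rfl
    by_cases hF : c = 'F'; · subst hF; rfl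
    by_cases hG : c = 'G'; · subst hG; rfl
    by_cases hA : c = 'A'; · subst hA; rfl
    by_cases hB : c = 'B'; · subst hB; rfl
    simp [pvLoopA, pvROOTS, PySem.List.enumerate, PySem.Chars.startswith, List.isPrefixOf,
      PySem.Chars.len, root2_eq, root1_eq, PySem.Dict.get?_mk_cons, PySem.Dict.get?,
      hC, hD, hE, hF, hG, hA, hB,
      Ne.symm hC, Ne.symm hD, Ne.symm hE, Ne.symm hF, Ne.symm hG, Ne.symm hA, Ne.symm hB]
  | c :: d :: r =>
    rw [PySem.Chars.slice, PySem.List.slice_to _ (by norm_num : (0:Int) ≤ 2),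
        PySem.Chars.slice, PySem.List.slice_to _ (by norm_num : (0:Int) ≤ 1)]
    by_cases hC : c = 'C'
    · subst hC
      by_cases hS : d = '#'; · subst hS; rfl
      simp [pvLoopA, pvROOTS, PySem.List.enumerate, PySem.Chars.startswith, List.isPrefixOf,
        PySem.Chars.len, root2_eq, root1_eq, PySem.Dict.get?_mk_cons, PySem.Dict.get?, hS, Ne.symm hS]
    by_cases hD : c = 'D'; · subst hD; rfl
    by_cases hE : c = 'E'
    · subst hE
      by_cases hS : d = 'b'; · subst hS; rfl
      simp [pvLoopA, pvROOTS, PySem.List.enumerate, PySem.Chars.startswith, List.isPrefixOf,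
        PySem.Chars.len, root2_eq, root1_eq, PySem.Dict.get?_mk_cons, PySem.Dict.get?, hS, Ne.symm hS]
    by_cases hF : c = 'F'
    · subst hF
      by_cases hS : d = '#'; · subst hS; rfl
      simp [pvLoopA, pvROOTS, PySem.List.enumerate, PySem.Chars.startswith, List.isPrefixOf,
        PySem.Chars.len, root2_eq, root1_eq, PySem.Dict.get?_mk_cons, PySem.Dict.get?, hS, Ne.symm hS]
    by_cases hG : c = 'G'; · subst hG; rfl
    by_cases hA : c = 'A'
    · subst hA
      by_cases hS : d = 'b'; · subst hS; rfl
      simp [pvLoopA, pvROOTS, PySem.List.enumerate, PySem.Chars.startswith, List.isPrefixOf,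
        PySem.Chars.len, root2_eq, root1_eq, PySem.Dict.get?_mk_cons, PySem.Dict.get?, hS, Ne.symm hS]
    by_cases hB : c = 'B'
    · subst hB
      by_cases hS : d = 'b'; · subst hS; rfl
      simp [pvLoopA, pvROOTS, PySem.List.enumerate, PySem.Chars.startswith, List.isPrefixOf,
        PySem.Chars.len, root2_eq, root1_eq, PySem.Dict.get?_mk_cons, PySem.Dict.get?, hS, Ne.symm hS]
    simp [pvLoopA, pvROOTS, PySem.List.enumerate, PySem.Chars.startswith, List.isPrefixOf,
      PySem.Chars.len, root2_eq, root1_eq, PySem.Dict.get?_mk_cons, PySem.Dict.get?,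
      hC, hD, hE, hF, hG, hA, hB,
      Ne.symm hC, Ne.symm hD, Ne.symm hE, Ne.symm hF, Ne.symm hG, Ne.symm hA, Ne.symm hB]

theorem root2_values (k : List Char) (i : Int) (h : PySem.Dict.get? pvROOT2 k = some i) : i ≠ -1 := by
  rw [root2_eq] at h
  simp only [PySem.Dict.get?_mk_cons] at h
  split_ifs at h <;> first | (injection h with h; omega) | simp [PySem.Dict.get?, List.find?] at h

theorem root1_values (k : List Char) (i : Int) (h : PySem.Dict.get? pvROOT1 k = some i) : i ≠ -1 := by
  rw [root1_eq] at h
  simp only [PySem.Dict.get?_mk_cons] at h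
  split_ifs at h <;> first | (injection h with h; omega) | simp [PySem.Dict.get?, List.find?] at h

-- ===== VERDICT (by name: the statement is the Claim_ definition above) =====
theorem label_to_idx_spec : Claim_equal_label_to_idx := by
  intro label _
  unfold Spec_label_to_idx label_to_idx label_to_idx_alt
  generalize PySem.Chars.strip label.toList = cs
  dsimp only
  rw [pvLoopA_eq cs]
  rcases h2 : PySem.Dict.get? pvROOT2 (PySem.Chars.slice cs none (some 2)) with _ | i
  · rcases h1 : PySem.Dict.get? pvROOT1 (PySem.Chars.slice cs none (some 1)) with _ | j
    · simp [h2, h1]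
    · have hj := root1_values _ _ h1
      simp [h2, h1, hj, pvBsuffix]
  · have hi := root2_values _ _ h2
    simp [h2, hi, pvBsuffix]
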